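-- pv_equiv track=rewrite | github.com/pokerdio/generic | euler/euler-804.py | bar
-- ===== SOURCE A (Python) =====
-- from math import sqrt
--
-- def bar(n):
--     """counts pairs with y such that 41yy>n"""
--     y0 = int(sqrt(n // 41))
--     x1 = 1
--     x2 = y0
--     ret = 0
--     for y in range(y0 + 1, y0 * 2):
--         y41 = y * y * 41
--         while x1 > 1 and (x1 * x1 - x1 * y + y41 <= n):
--             x1 -= 1
--         while x1 < y and (x1 * x1 - x1 * y + y41 > n):
--             x1 += 1
--
--         while x2 < y and (x2 * x2 - x2 * y + y41 <= n):
--             x2 += 1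
--         while x2 > 1 and (x2 * x2 - x2 * y + y41 > n):
--             x2 -= 1
--
--
--         if x1 > x2:
--             return ret
--
--         ret += (x2 - x1 + 1) * 2
--     return ret
-- ===== SOURCE B (Python) =====
-- from math import isqrt
--
-- def bar(n):
--     """counts pairs with y such that 41yy>n"""
--     y0 = isqrt(n // 41)
--     ret = 0
--     for y in range(y0 + 1, y0 * 2):
--         D = 4 * n - 163 * y * y
--         if D < 0:
--             return ret
--         s = isqrt(D)
--         lo = (y - s + 1) // 2
--         hi = (y + s) // 2
--         if lo > hi:
--             return ret
--         ret += (hi - lo + 1) * 2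
--     return ret
-- ===== Notes on version B (the rewrite author's own statement) =====
-- stated objective: simpler
-- what changed: A walks two persistent pointers x1/x2 with four inner while loops to locate, for each y, the interval of x with x*x - x*y + 41*y*y <= n; B computes that interval in closed form per y from the discriminant D = 4n - 163y^2 via exact integer isqrt (lo = (y-s+1)//2, hi = (y+s)//2), and uses math.isqrt instead of the float sqrt for y0 as well.
import Mathlib
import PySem

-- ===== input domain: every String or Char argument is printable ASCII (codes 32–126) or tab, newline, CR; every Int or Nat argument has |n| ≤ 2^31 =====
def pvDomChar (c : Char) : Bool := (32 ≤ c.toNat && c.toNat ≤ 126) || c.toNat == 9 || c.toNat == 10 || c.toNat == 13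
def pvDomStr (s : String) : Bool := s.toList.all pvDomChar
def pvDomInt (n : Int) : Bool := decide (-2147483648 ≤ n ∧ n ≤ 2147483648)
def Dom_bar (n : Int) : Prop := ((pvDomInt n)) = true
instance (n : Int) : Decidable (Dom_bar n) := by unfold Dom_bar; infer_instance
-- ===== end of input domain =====

-- B replaces A's four pointer-walking inner while loops by a closed-form per-y interval
-- computed with exact integer isqrt (objective: simpler).

-- ===== PORT A =====
-- Python's unbounded `while` loops are ported with an explicit fuel that equals the exact
-- number of steps the loop can take before its own guard stops it (the pointer moves one
-- step per iteration inside [1, y]), so the fuelled recursion computes the same value.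

-- while x1 > 1 and (x1*x1 - x1*y + y41 <= n): x1 -= 1     (fuel: x1 can drop to at most 1)
def barW1a (n y y41 : Int) : Nat → Int → Int
  | 0, x1 => x1
  | fuel + 1, x1 =>
      if 1 < x1 ∧ x1 * x1 - x1 * y + y41 ≤ n then barW1a n y y41 fuel (x1 - 1) else x1

-- while x1 < y and (x1*x1 - x1*y + y41 > n): x1 += 1      (fuel: x1 can rise to at most y)
def barW1b (n y y41 : Int) : Nat → Int → Int
  | 0, x1 => x1
  | fuel + 1, x1 =>
      if x1 < y ∧ n < x1 * x1 - x1 * y + y41 then barW1b n y y41 fuel (x1 + 1) else x1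

-- while x2 < y and (x2*x2 - x2*y + y41 <= n): x2 += 1
def barW2a (n y y41 : Int) : Nat → Int → Int
  | 0, x2 => x2
  | fuel + 1, x2 =>
      if x2 < y ∧ x2 * x2 - x2 * y + y41 ≤ n then barW2a n y y41 fuel (x2 + 1) else x2

-- while x2 > 1 and (x2*x2 - x2*y + y41 > n): x2 -= 1
def barW2b (n y y41 : Int) : Nat → Int → Int
  | 0, x2 => x2
  | fuel + 1, x2 =>
      if 1 < x2 ∧ n < x2 * x2 - x2 * y + y41 then barW2b n y y41 fuel (x2 - 1) else x2

-- the for-loop body of A, with the early `return ret` as stopping the recursion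
def barLoop (n : Int) : List Int → Int → Int → Int → Int
  | [], _, _, ret => ret
  | y :: ys, x1, x2, ret =>
      let y41 := y * y * 41
      let x1 := barW1a n y y41 (x1 - 1).toNat x1
      let x1 := barW1b n y y41 (y - x1).toNat x1
      let x2 := barW2a n y y41 (y - x2).toNat x2
      let x2 := barW2b n y y41 (x2 - 1).toNat x2
      if x2 < x1 then ret
      else barLoop n ys x1 x2 (ret + (x2 - x1 + 1) * 2)

-- int(sqrt(n//41)): Python's float sqrt is exact on the admitted inputs (0 ≤ n ≤ 2^31,
-- so n//41 ≤ 52 428 800 and the correctly-rounded double sqrt truncates to the integer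
-- square root); ported as Int.sqrt.
def bar (n : Int) : Int :=
  let y0 := Int.sqrt (PySem.Int.floordiv n 41)
  barLoop n (PySem.List.pyRange (y0 + 1) (y0 * 2) 1) 1 y0 0

-- ===== PORT B =====
def barAltLoop (n : Int) : List Int → Int → Int
  | [], ret => ret
  | y :: ys, ret =>
      let D := 4 * n - 163 * y * y
      if D < 0 then ret
      else
        let s := Int.sqrt D          -- math.isqrt (D ≥ 0 here)
        let lo := PySem.Int.floordiv (y - s + 1) 2
        let hi := PySem.Int.floordiv (y + s) 2
        if hi < lo then ret
        else barAltLoop n ys (ret + (hi - lo + 1) * 2)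

def bar_alt (n : Int) : Int :=
  let y0 := Int.sqrt (PySem.Int.floordiv n 41)   -- math.isqrt(n // 41)
  barAltLoop n (PySem.List.pyRange (y0 + 1) (y0 * 2) 1) 0

-- ===== PRECONDITION & SPEC =====
-- Pre_ excludes n < 0, on which A raises ValueError (math domain error in sqrt(n//41)).
def Pre_bar (n : Int) : Prop := 0 ≤ n
instance (n : Int) : Decidable (Pre_bar n) := by unfold Pre_bar; infer_instance
def pvWitness_bar : Int := 5000

def Spec_bar (n : Int) (out : Int) : Prop := out = bar_alt n
instance (n : Int) (out : Int) : Decidable (Spec_bar n out) := by unfold Spec_bar; infer_instance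

-- ===== CLAIM (what is proved, stated in full; the proofs are below) =====
def Claim_equal_bar : Prop := ∀ (n : Int), Dom_bar n → Pre_bar n → Spec_bar n (bar n)

-- ===== LEMMAS AND PROOFS =====

-- proof-side names for B's per-y quantities
def pvD (n y : Int) : Int := 4 * n - 163 * y * y
def pvS (n y : Int) : Int := Int.sqrt (pvD n y)
def pvLo (n y : Int) : Int := PySem.Int.floordiv (y - pvS n y + 1) 2
def pvHi (n y : Int) : Int := PySem.Int.floordiv (y + pvS n y) 2

theorem pvSqrt_spec (D : Int) (h : 0 ≤ D) :
    0 ≤ Int.sqrt D ∧ Int.sqrt D * Int.sqrt D ≤ D ∧ D < (Int.sqrt D + 1) * (Int.sqrt D + 1) := by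
  have h0 : Int.sqrt D = ((Nat.sqrt D.toNat : Nat) : Int) := rfl
  have h1 : Nat.sqrt D.toNat * Nat.sqrt D.toNat ≤ D.toNat := by
    have := Nat.sqrt_le' D.toNat; nlinarith [this]
  have h2 : D.toNat < (Nat.sqrt D.toNat + 1) * (Nat.sqrt D.toNat + 1) := by
    have := Nat.lt_succ_sqrt' D.toNat; nlinarith [this]
  have h3 : ((D.toNat : Nat) : Int) = D := Int.toNat_of_nonneg h
  refine ⟨by rw [h0]; exact_mod_cast Nat.zero_le _, ?_, ?_⟩
  · rw [h0, ← h3]; exact_mod_cast h1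
  · rw [h0, ← h3]; exact_mod_cast h2

theorem pvS_spec (n y : Int) (h : 0 ≤ pvD n y) :
    0 ≤ pvS n y ∧ pvS n y * pvS n y ≤ pvD n y ∧ pvD n y < (pvS n y + 1) * (pvS n y + 1) :=
  pvSqrt_spec (pvD n y) h

theorem pvLo_ediv (n y : Int) : pvLo n y = (y - pvS n y + 1) / 2 := by
  unfold pvLo; exact PySem.Int.floordiv_eq_ediv_of_pos (by omega)
theorem pvHi_ediv (n y : Int) : pvHi n y = (y + pvS n y) / 2 := by
  unfold pvHi; exact PySem.Int.floordiv_eq_ediv_of_pos (by omega)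

-- f(x) ≤ n ↔ D ≥ 0 and x ∈ [lo, hi]
theorem pvMem_iff (n y x : Int) :
    x * x - x * y + y * y * 41 ≤ n ↔ (0 ≤ pvD n y ∧ pvLo n y ≤ x ∧ x ≤ pvHi n y) := by
  have hD : pvD n y = 4 * n - 163 * y * y := rfl
  constructor
  · intro h
    have ht : (2 * x - y) * (2 * x - y) ≤ pvD n y := by rw [hD]; nlinarith
    have hD0 : 0 ≤ pvD n y := le_trans (mul_self_nonneg _) ht
    obtain ⟨hs0, hs1, hs2⟩ := pvS_spec n y hD0
    have hub : 2 * x - y ≤ pvS n y := by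
      by_contra hcon; push_neg at hcon
      have h1 : pvS n y + 1 ≤ 2 * x - y := hcon
      have h2 : (pvS n y + 1) * (pvS n y + 1) ≤ (2 * x - y) * (2 * x - y) :=
        mul_le_mul h1 h1 (by omega) (by omega)
      linarith
    have hlb : -(pvS n y) ≤ 2 * x - y := by
      by_contra hcon; push_neg at hcon
      have h1 : pvS n y + 1 ≤ y - 2 * x := by omega
      have h2 : (pvS n y + 1) * (pvS n y + 1) ≤ (y - 2 * x) * (y - 2 * x) :=
        mul_le_mul h1 h1 (by omega) (by omega)
      have h3 : (y - 2 * x) * (y - 2 * x) = (2 * x - y) * (2 * x - y) := by ring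
      linarith
    have e1 := pvLo_ediv n y; have e2 := pvHi_ediv n y
    exact ⟨hD0, by omega, by omega⟩
  · rintro ⟨hD0, hl, hh⟩
    obtain ⟨hs0, hs1, hs2⟩ := pvS_spec n y hD0
    have e1 := pvLo_ediv n y; have e2 := pvHi_ediv n y
    have hub : 2 * x - y ≤ pvS n y := by omega
    have hlb : -(pvS n y) ≤ 2 * x - y := by omega
    have hp : 0 ≤ (pvS n y - (2 * x - y)) * (pvS n y + (2 * x - y)) :=
      mul_nonneg (by omega) (by omega)
    have hsq : (2 * x - y) * (2 * x - y) ≤ pvS n y * pvS n y := by nlinarith [hp]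
    have ht : (2 * x - y) * (2 * x - y) ≤ 4 * n - 163 * y * y := by
      rw [← hD]; exact le_trans hsq hs1
    nlinarith [ht]

-- when D ≥ 0 and 41y² > n the interval sits inside [1, y-1]
theorem pvBounds (n y : Int) (hy : 1 ≤ y) (hq : n < 41 * (y * y)) (hD : 0 ≤ pvD n y) :
    1 ≤ pvLo n y ∧ pvHi n y ≤ y - 1 := by
  have hDe : pvD n y = 4 * n - 163 * (y * y) := by unfold pvD; ring
  obtain ⟨hs0, hs1, hs2⟩ := pvS_spec n y hD
  have hsy : pvS n y ≤ y - 1 := by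
    by_contra hcon; push_neg at hcon
    have h1 : y ≤ pvS n y := by omega
    have h2 : y * y ≤ pvS n y * pvS n y := mul_le_mul h1 h1 (by omega) (by omega)
    linarith
  have e1 := pvLo_ediv n y; have e2 := pvHi_ediv n y
  constructor <;> omega

-- successive nonempty intervals overlap enough for A's persistent pointers
theorem pvCross (n y : Int) (hy : 0 ≤ y)
    (h1 : 0 ≤ pvD n y ∧ pvLo n y ≤ pvHi n y)
    (h2 : 0 ≤ pvD n (y + 1) ∧ pvLo n (y + 1) ≤ pvHi n (y + 1)) :
    pvLo n y ≤ pvHi n (y + 1) ∧ pvLo n (y + 1) ≤ pvHi n y := by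
  obtain ⟨hs0, hs1, hs2⟩ := pvS_spec n y h1.1
  obtain ⟨hs0', hs1', hs2'⟩ := pvS_spec n (y + 1) h2.1
  have hDle : pvD n (y + 1) ≤ pvD n y := by
    have he : pvD n y - pvD n (y + 1) = 163 * (2 * y + 1) := by unfold pvD; ring
    omega
  have hss : pvS n (y + 1) ≤ pvS n y := by
    by_contra hcon; push_neg at hcon
    have ha : pvS n y + 1 ≤ pvS n (y + 1) := hcon
    have hb : (pvS n y + 1) * (pvS n y + 1) ≤ pvS n (y + 1) * pvS n (y + 1) :=
      mul_le_mul ha ha (by omega) (by omega)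
    linarith
  have e1 := pvLo_ediv n y; have e2 := pvHi_ediv n y
  have e3 := pvLo_ediv n (y+1); have e4 := pvHi_ediv n (y+1)
  have k1 := h1.2; have k2 := h2.2
  constructor <;> omega

-- ---- characterizations of A's four while loops ----
-- throughout, hmem says the solution set of x*x - x*y + y41 ≤ n is exactly [a, b]

theorem pvW1a_le (n y y41 a b : Int)
    (hmem : ∀ x : Int, x * x - x * y + y41 ≤ n ↔ (a ≤ x ∧ x ≤ b)) (ha : 1 ≤ a) :
    ∀ (k : Nat) (x1 : Int), 1 ≤ x1 → x1 ≤ b → (x1 - 1).toNat ≤ k →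
      1 ≤ barW1a n y y41 k x1 ∧ barW1a n y y41 k x1 ≤ a := by
  intro k
  induction k with
  | zero =>
    intro x1 h1 hb hk
    simp only [barW1a]
    omega
  | succ k ih =>
    intro x1 h1 hb hk
    simp only [barW1a]
    by_cases hc : 1 < x1 ∧ x1 * x1 - x1 * y + y41 ≤ n
    · rw [if_pos hc]
      exact ih (x1 - 1) (by omega) (by omega) (by omega)
    · rw [if_neg hc]
      refine ⟨h1, ?_⟩
      by_cases hx : 1 < x1
      · have hnp : ¬ (x1 * x1 - x1 * y + y41 ≤ n) := fun hp => hc ⟨hx, hp⟩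
        have : ¬ (a ≤ x1 ∧ x1 ≤ b) := fun h => hnp ((hmem x1).mpr h)
        omega
      · omega

theorem pvW1b_eq (n y y41 a b : Int)
    (hmem : ∀ x : Int, x * x - x * y + y41 ≤ n ↔ (a ≤ x ∧ x ≤ b)) (hab : a ≤ b) (hby : b ≤ y - 1) :
    ∀ (k : Nat) (x1 : Int), x1 ≤ a → (a - x1).toNat ≤ k → barW1b n y y41 k x1 = a := by
  intro k
  induction k with
  | zero =>
    intro x1 hxa hk
    simp only [barW1b]
    omega
  | succ k ih =>
    intro x1 hxa hk
    simp only [barW1b]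
    by_cases hx : x1 = a
    · subst hx
      have hP : x1 * x1 - x1 * y + y41 ≤ n := (hmem x1).mpr ⟨le_refl _, hab⟩
      rw [if_neg (by omega : ¬ (x1 < y ∧ n < x1 * x1 - x1 * y + y41))]
    · have hlt : x1 < a := by omega
      have hnp : ¬ (x1 * x1 - x1 * y + y41 ≤ n) := fun hp => by
        have := ((hmem x1).mp hp).1; omega
      rw [if_pos ⟨by omega, by omega⟩]
      exact ih (x1 + 1) (by omega) (by omega)

theorem pvW2a_gt (n y y41 a b : Int)
    (hmem : ∀ x : Int, x * x - x * y + y41 ≤ n ↔ (a ≤ x ∧ x ≤ b)) (hby : b ≤ y - 1) :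
    ∀ (k : Nat) (x2 : Int), a ≤ x2 → x2 ≤ y → (y - x2).toNat ≤ k →
      b < barW2a n y y41 k x2 ∧ barW2a n y y41 k x2 ≤ y := by
  intro k
  induction k with
  | zero =>
    intro x2 hax hxy hk
    simp only [barW2a]
    omega
  | succ k ih =>
    intro x2 hax hxy hk
    simp only [barW2a]
    by_cases hc : x2 < y ∧ x2 * x2 - x2 * y + y41 ≤ n
    · rw [if_pos hc]
      have hb2 : x2 ≤ b := ((hmem x2).mp hc.2).2
      exact ih (x2 + 1) (by omega) (by omega) (by omega)
    · rw [if_neg hc]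
      by_cases hx : x2 < y
      · have hnp : ¬ (x2 * x2 - x2 * y + y41 ≤ n) := fun hp => hc ⟨hx, hp⟩
        have : ¬ (a ≤ x2 ∧ x2 ≤ b) := fun h => hnp ((hmem x2).mpr h)
        omega
      · omega

theorem pvW2b_eq (n y y41 a b : Int)
    (hmem : ∀ x : Int, x * x - x * y + y41 ≤ n ↔ (a ≤ x ∧ x ≤ b)) (ha : 1 ≤ a) (hab : a ≤ b) :
    ∀ (k : Nat) (x2 : Int), b ≤ x2 → (x2 - b).toNat ≤ k → barW2b n y y41 k x2 = b := by
  intro k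
  induction k with
  | zero =>
    intro x2 hbx hk
    simp only [barW2b]
    omega
  | succ k ih =>
    intro x2 hbx hk
    simp only [barW2b]
    by_cases hx : x2 = b
    · subst hx
      have hP : x2 * x2 - x2 * y + y41 ≤ n := (hmem x2).mpr ⟨hab, le_refl _⟩
      rw [if_neg (by omega : ¬ (1 < x2 ∧ n < x2 * x2 - x2 * y + y41))]
    · have hlt : b < x2 := by omega
      have hnp : ¬ (x2 * x2 - x2 * y + y41 ≤ n) := fun hp => by
        have := ((hmem x2).mp hp).2; omega
      rw [if_pos ⟨by omega, by omega⟩]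
      exact ih (x2 - 1) (by omega) (by omega)

-- ---- the same loops when no x satisfies the inequality ----

theorem pvW1a_empty (n y y41 : Int) (k : Nat) (x1 : Int)
    (hemp : ∀ x : Int, ¬ (x * x - x * y + y41 ≤ n)) : barW1a n y y41 k x1 = x1 := by
  cases k with
  | zero => rfl
  | succ k => simp only [barW1a]; rw [if_neg (fun h => hemp x1 h.2)]

theorem pvW2a_empty (n y y41 : Int) (k : Nat) (x2 : Int)
    (hemp : ∀ x : Int, ¬ (x * x - x * y + y41 ≤ n)) : barW2a n y y41 k x2 = x2 := by
  cases k with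
  | zero => rfl
  | succ k => simp only [barW2a]; rw [if_neg (fun h => hemp x2 h.2)]

theorem pvW1b_empty (n y y41 : Int)
    (hemp : ∀ x : Int, ¬ (x * x - x * y + y41 ≤ n)) :
    ∀ (k : Nat) (x1 : Int), x1 ≤ y → (y - x1).toNat ≤ k → barW1b n y y41 k x1 = y := by
  intro k
  induction k with
  | zero =>
    intro x1 hxy hk
    simp only [barW1b]
    omega
  | succ k ih =>
    intro x1 hxy hk
    simp only [barW1b]
    by_cases hx : x1 = y
    · rw [if_neg (by omega : ¬ (x1 < y ∧ n < x1 * x1 - x1 * y + y41))]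
      omega
    · have h := hemp x1
      rw [if_pos ⟨by omega, by omega⟩]
      exact ih (x1 + 1) (by omega) (by omega)

theorem pvW2b_empty (n y y41 : Int)
    (hemp : ∀ x : Int, ¬ (x * x - x * y + y41 ≤ n)) :
    ∀ (k : Nat) (x2 : Int), 1 ≤ x2 → (x2 - 1).toNat ≤ k → barW2b n y y41 k x2 = 1 := by
  intro k
  induction k with
  | zero =>
    intro x2 h1 hk
    simp only [barW2b]
    omega
  | succ k ih =>
    intro x2 h1 hk
    simp only [barW2b]
    by_cases hx : x2 = 1
    · rw [if_neg (by omega : ¬ (1 < x2 ∧ n < x2 * x2 - x2 * y + y41))]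
      omega
    · have h := hemp x2
      rw [if_pos ⟨by omega, by omega⟩]
      exact ih (x2 - 1) (by omega) (by omega)

-- one-step unfoldings of the two loops
theorem barLoop_cons (n y : Int) (ys : List Int) (x1 x2 ret : Int) :
    barLoop n (y :: ys) x1 x2 ret =
      (let u1 := barW1b n y (y*y*41) (y - barW1a n y (y*y*41) (x1 - 1).toNat x1).toNat
                   (barW1a n y (y*y*41) (x1 - 1).toNat x1)
       let u2 := barW2b n y (y*y*41)
                   (barW2a n y (y*y*41) (y - x2).toNat x2 - 1).toNat
                   (barW2a n y (y*y*41) (y - x2).toNat x2)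
       if u2 < u1 then ret
       else barLoop n ys u1 u2 (ret + (u2 - u1 + 1) * 2)) := rfl

theorem barAltLoop_cons (n y : Int) (ys : List Int) (ret : Int) :
    barAltLoop n (y :: ys) ret =
      if pvD n y < 0 then ret
      else if pvHi n y < pvLo n y then ret
      else barAltLoop n ys (ret + (pvHi n y - pvLo n y + 1) * 2) := rfl

-- the loop invariant carried across iterations of A
def pvInv (n y x1 x2 : Int) : Prop :=
  1 ≤ x1 ∧ x1 ≤ y ∧ 1 ≤ x2 ∧ x2 ≤ y ∧
    ((0 ≤ pvD n y ∧ pvLo n y ≤ pvHi n y) → (x1 ≤ pvHi n y ∧ pvLo n y ≤ x2))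

theorem pvLoopEq (n y0 : Int) (hn : 0 ≤ n) (hy0 : 2 ≤ y0)
    (hq : n < 41 * ((y0 + 1) * (y0 + 1))) :
    ∀ (k : Nat) (y x1 x2 ret : Int), (2 * y0 - y).toNat = k → y0 + 1 ≤ y →
      pvInv n y x1 x2 →
      barLoop n (PySem.List.pyRange y (y0 * 2) 1) x1 x2 ret
        = barAltLoop n (PySem.List.pyRange y (y0 * 2) 1) ret := by
  intro k
  induction k with
  | zero =>
    intro y x1 x2 ret hk hy hinv
    rw [PySem.List.pyRange_one_eq_nil (by omega)]
    rfl
  | succ k ih =>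
    intro y x1 x2 ret hk hy hinv
    rw [PySem.List.pyRange_one_cons (by omega : y < y0 * 2)]
    have hyy : (y0 + 1) * (y0 + 1) ≤ y * y := mul_le_mul hy hy (by omega) (by omega)
    have hq_y : n < 41 * (y * y) := by linarith
    obtain ⟨hi1, hi2, hi3, hi4, hi5⟩ := hinv
    by_cases hne : 0 ≤ pvD n y ∧ pvLo n y ≤ pvHi n y
    · obtain ⟨hlo1, hhi1⟩ := pvBounds n y (by omega) hq_y hne.1
      have hmem : ∀ x : Int, x * x - x * y + y * y * 41 ≤ n ↔ (pvLo n y ≤ x ∧ x ≤ pvHi n y) :=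
        fun x => by
          rw [pvMem_iff n y x]
          exact ⟨fun h => ⟨h.2.1, h.2.2⟩, fun h => ⟨hne.1, h.1, h.2⟩⟩
      obtain ⟨hxa, hxb⟩ := hi5 hne
      have e1 := pvW1a_le n y (y*y*41) (pvLo n y) (pvHi n y) hmem hlo1
        (x1 - 1).toNat x1 hi1 hxa (le_refl _)
      have e1' : barW1b n y (y*y*41) (y - barW1a n y (y*y*41) (x1 - 1).toNat x1).toNat
            (barW1a n y (y*y*41) (x1 - 1).toNat x1) = pvLo n y :=
        pvW1b_eq n y (y*y*41) (pvLo n y) (pvHi n y) hmem hne.2 hhi1 _ _ e1.2 (by omega)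
      have e2 := pvW2a_gt n y (y*y*41) (pvLo n y) (pvHi n y) hmem hhi1
        (y - x2).toNat x2 hxb hi4 (le_refl _)
      have e2' : barW2b n y (y*y*41) (barW2a n y (y*y*41) (y - x2).toNat x2 - 1).toNat
            (barW2a n y (y*y*41) (y - x2).toNat x2) = pvHi n y :=
        pvW2b_eq n y (y*y*41) (pvLo n y) (pvHi n y) hmem hlo1 hne.2 _ _ (le_of_lt e2.1) (by omega)
      rw [barLoop_cons, barAltLoop_cons]
      simp only []
      rw [e1', e2']
      rw [if_neg (by omega : ¬ pvHi n y < pvLo n y),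
          if_neg (by omega : ¬ pvD n y < 0),
          if_neg (by omega : ¬ pvHi n y < pvLo n y)]
      refine ih (y + 1) (pvLo n y) (pvHi n y) _ (by omega) (by omega) ?_
      refine ⟨hlo1, by omega, by omega, by omega, fun h2 => ?_⟩
      exact pvCross n y (by omega) hne h2
    · have hemp : ∀ x : Int, ¬ (x * x - x * y + y * y * 41 ≤ n) := fun x hx => by
        have h := (pvMem_iff n y x).mp hx
        exact hne ⟨h.1, le_trans h.2.1 h.2.2⟩
      have e1 : barW1a n y (y*y*41) (x1 - 1).toNat x1 = x1 :=
        pvW1a_empty n y (y*y*41) _ x1 hemp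
      have e2 : barW2a n y (y*y*41) (y - x2).toNat x2 = x2 :=
        pvW2a_empty n y (y*y*41) _ x2 hemp
      rw [barLoop_cons, barAltLoop_cons]
      simp only []
      rw [e1, e2]
      have e1' : barW1b n y (y*y*41) (y - x1).toNat x1 = y :=
        pvW1b_empty n y (y*y*41) hemp _ x1 hi2 (le_refl _)
      have e2' : barW2b n y (y*y*41) (x2 - 1).toNat x2 = 1 :=
        pvW2b_empty n y (y*y*41) hemp _ x2 hi3 (le_refl _)
      rw [e1', e2']
      rw [if_pos (by omega : (1:Int) < y)]
      by_cases hDneg : pvD n y < 0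
      · rw [if_pos hDneg]
      · rw [if_neg hDneg]
        have hhl : pvHi n y < pvLo n y := by
          by_contra hle
          exact hne ⟨by omega, by omega⟩
        rw [if_pos hhl]

-- ===== VERDICT (by name: the statement is the Claim_ definition above) =====
theorem bar_spec : Claim_equal_bar := by
  unfold Claim_equal_bar
  intro n hdom hpre
  have hn : (0:Int) ≤ n := hpre
  unfold Spec_bar
  simp only [bar, bar_alt]
  have hm : PySem.Int.floordiv n 41 = n / 41 := PySem.Int.floordiv_eq_ediv_of_pos (by omega)
  have hm0 : 0 ≤ PySem.Int.floordiv n 41 := by rw [hm]; exact Int.ediv_nonneg hn (by omega)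
  obtain ⟨a0, a1, a2⟩ := pvSqrt_spec (PySem.Int.floordiv n 41) hm0
  set y0 := Int.sqrt (PySem.Int.floordiv n 41) with hy0def
  have hq : n < 41 * ((y0 + 1) * (y0 + 1)) := by
    have h41 : 41 * (n / 41) ≤ n ∧ n < 41 * (n / 41) + 41 := by omega
    have hmy : PySem.Int.floordiv n 41 + 1 ≤ (y0 + 1) * (y0 + 1) := by omega
    rw [hm] at hmy
    linarith
  by_cases hsmall : y0 * 2 ≤ y0 + 1
  · rw [PySem.List.pyRange_one_eq_nil hsmall]
    rfl
  · refine pvLoopEq n y0 hn (by omega) hq _ (y0 + 1) 1 y0 0 rfl (le_refl _) ?_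
    refine ⟨le_refl _, by omega, by omega, by omega, fun h => ?_⟩
    obtain ⟨l1, h1⟩ := pvBounds n (y0 + 1) (by omega) hq h.1
    exact ⟨by omega, by omega⟩
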